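-- pv_equiv track=rewrite | github.com/jungseKim/Python_Practice | Coding_test/Alone_test/WalletSize.py | solution
-- ===== SOURCE A (Python) =====
-- def solution(sizes):
--     top = []
--     low = []
--     for x, y in sizes:
--         if(x > y):
--             top.append(x)
--             low.append(y)
--         else:
--             low.append(x)
--             top.append(y)
--
--     return max(top)*max(low)
-- ===== SOURCE B (Python) =====
-- def solution(sizes):
--     # Divide-and-conquer: split the list in half, combine (top_max, low_max)
--     # results of the halves; raises ValueError on empty input (like A's max([])).
--     def rec(lst):
--         if not lst:
--             raise ValueError("empty sizes")
--         if len(lst) == 1: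
--             x, y = lst[0]
--             return (max(x, y), min(x, y))
--         m = (len(lst) + 1) // 2
--         t1, l1 = rec(lst[:m])
--         t2, l2 = rec(lst[m:])
--         return (max(t1, t2), max(l1, l2))
--     t, l = rec(sizes)
--     return t * l
-- ===== Notes on version B (the rewrite author's own statement) =====
-- stated objective: alternative
-- what changed: Replaces A's iterative build-two-lists-then-max scan with a recursive divide-and-conquer that splits the list in half and merges (top_max, low_max) pairs; Pre_ excludes the empty list, on which both raise ValueError.
import Mathlib
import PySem

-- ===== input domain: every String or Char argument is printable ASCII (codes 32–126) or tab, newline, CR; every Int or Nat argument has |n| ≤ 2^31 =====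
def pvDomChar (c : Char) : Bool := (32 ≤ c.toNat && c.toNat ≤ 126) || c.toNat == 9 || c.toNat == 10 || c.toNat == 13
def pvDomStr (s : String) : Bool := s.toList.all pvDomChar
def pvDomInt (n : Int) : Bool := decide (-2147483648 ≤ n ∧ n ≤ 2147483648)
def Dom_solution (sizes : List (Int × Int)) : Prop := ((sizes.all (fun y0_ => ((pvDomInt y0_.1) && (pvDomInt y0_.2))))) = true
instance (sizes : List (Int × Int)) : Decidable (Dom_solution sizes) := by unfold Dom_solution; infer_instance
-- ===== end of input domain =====

-- B solves the task by divide-and-conquer (split in half, merge (top_max, low_max) pairs)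
-- instead of A's iterative two-lists + two max() scans; Pre_ excludes the empty list,
-- on which both Pythons raise ValueError.


-- ===== PORT A =====
def solution (sizes : List (Int × Int)) : Int :=
  let tl := sizes.foldl
    (fun (s : List Int × List Int) p =>
      if p.1 > p.2 then (s.1 ++ [p.1], s.2 ++ [p.2])
      else (s.1 ++ [p.2], s.2 ++ [p.1]))
    ([], [])
  -- max(top) * max(low); on [] Python raises ValueError (excluded by Pre_), getD 0 is a placeholder
  ((PySem.List.max? tl.1 (fun v => v)).getD 0) * ((PySem.List.max? tl.2 (fun v => v)).getD 0)

-- ===== PORT B =====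
-- rec(lst) of Source B: divide and conquer returning (top_max, low_max)
def solutionRec : List (Int × Int) → Int × Int
  | [] => (0, 0)  -- Python raises ValueError here (excluded by Pre_)
  | [p] => (max p.1 p.2, min p.1 p.2)
  | p :: q :: rest =>
    let l := p :: q :: rest
    let m := (l.length + 1) / 2
    let a := solutionRec (l.take m)
    let b := solutionRec (l.drop m)
    (max a.1 b.1, max a.2 b.2)
termination_by l => l.length
decreasing_by
  · simp [List.length_take]; omega
  · simp [List.length_drop]; omega

def solution_alt (sizes : List (Int × Int)) : Int :=
  let tl := solutionRec sizes
  tl.1 * tl.2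

-- ===== PRECONDITION & SPEC =====
-- Pre_ excludes only the empty list, on which both Pythons raise ValueError.
def Pre_solution (sizes : List (Int × Int)) : Prop := sizes ≠ []
instance (sizes : List (Int × Int)) : Decidable (Pre_solution sizes) := by unfold Pre_solution; infer_instance
def pvWitness_solution : (List (Int × Int)) := [(3, 5), (7, 2)]
def Spec_solution (sizes : List (Int × Int)) (out : Int) : Prop := out = solution_alt sizes
instance (sizes : List (Int × Int)) (out : Int) : Decidable (Spec_solution sizes out) := by unfold Spec_solution; infer_instance

-- ===== CLAIM (what is proved, stated in full; the proofs are below) =====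
def Claim_equal_solution : Prop := ∀ (sizes : List (Int × Int)), Dom_solution sizes → Pre_solution sizes → Spec_solution sizes (solution sizes)

-- ===== LEMMAS AND PROOFS =====

-- max of a nonempty Int list, Python style (0 on [] is a proof-side placeholder).
def mmax : List Int → Int
  | [] => 0
  | a :: t => t.foldl max a

theorem foldl_max_shift (t : List Int) (A b : Int) :
    t.foldl max (max A b) = max A (t.foldl max b) := by
  induction t generalizing b with
  | nil => rfl
  | cons c t ih => simp only [List.foldl_cons, max_assoc]; exact ih _

theorem mmax_append (l1 l2 : List Int) (h1 : l1 ≠ []) (h2 : l2 ≠ []) :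
    mmax (l1 ++ l2) = max (mmax l1) (mmax l2) := by
  match l1, l2 with
  | a :: t1, b :: t2 =>
    simp only [mmax, List.cons_append, List.foldl_append, List.foldl_cons]
    rw [foldl_max_shift]

-- A's fold appends, pair by pair, the larger dimension to top and the smaller to low.
theorem solutionA_fold (sizes : List (Int × Int)) (a b : List Int) :
    sizes.foldl
      (fun (s : List Int × List Int) p =>
        if p.1 > p.2 then (s.1 ++ [p.1], s.2 ++ [p.2])
        else (s.1 ++ [p.2], s.2 ++ [p.1]))
      (a, b)
    = (a ++ sizes.map (fun p => max p.1 p.2), b ++ sizes.map (fun p => min p.1 p.2)) := by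
  induction sizes generalizing a b with
  | nil => simp
  | cons p rest ih =>
    simp only [List.foldl_cons, List.map_cons]
    by_cases h : p.1 > p.2
    · simp only [if_pos h]
      rw [ih]
      have h1 : max p.1 p.2 = p.1 := by omega
      have h2 : min p.1 p.2 = p.2 := by omega
      simp [h1, h2]
    · simp only [if_neg h]
      rw [ih]
      have h1 : max p.1 p.2 = p.2 := by omega
      have h2 : min p.1 p.2 = p.1 := by omega
      simp [h1, h2]

-- B's divide-and-conquer computes the max larger-dim and max smaller-dim.
theorem solutionRec_spec : ∀ (n : Nat) (lst : List (Int × Int)), lst.length ≤ n → lst ≠ [] →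
    solutionRec lst = (mmax (lst.map (fun p => max p.1 p.2)), mmax (lst.map (fun p => min p.1 p.2))) := by
  intro n
  induction n with
  | zero =>
    intro lst h hne
    cases lst with
    | nil => exact absurd rfl hne
    | cons a t => simp at h
  | succ n ih =>
    intro lst hlen hne
    match lst with
    | [p] => simp [solutionRec, mmax]
    | p :: q :: rest =>
      rw [solutionRec]
      set l := p :: q :: rest with hl
      set m := (l.length + 1) / 2 with hm
      have hlenl : l.length = rest.length + 2 := by simp [hl]
      have hm1 : 1 ≤ m := by omega
      have hm2 : m < l.length := by omega
      have htake : (l.take m).length ≤ n := by simp; omega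
      have hdrop : (l.drop m).length ≤ n := by simp; omega
      have htne : l.take m ≠ [] := by
        intro h; have := congrArg List.length h; simp at this; omega
      have hdne : l.drop m ≠ [] := by
        intro h; have := congrArg List.length h; simp at this; omega
      rw [ih _ htake htne, ih _ hdrop hdne]
      have hsplit : l = l.take m ++ l.drop m := (List.take_append_drop m l).symm
      have h1 : mmax (l.map (fun p => max p.1 p.2))
          = max (mmax ((l.take m).map (fun p => max p.1 p.2))) (mmax ((l.drop m).map (fun p => max p.1 p.2))) := by
        conv_lhs => rw [hsplit]
        rw [List.map_append, mmax_append _ _ (by simpa using htne) (by simpa using hdne)]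
      have h2 : mmax (l.map (fun p => min p.1 p.2))
          = max (mmax ((l.take m).map (fun p => min p.1 p.2))) (mmax ((l.drop m).map (fun p => min p.1 p.2))) := by
        conv_lhs => rw [hsplit]
        rw [List.map_append, mmax_append _ _ (by simpa using htne) (by simpa using hdne)]
      simp [h1, h2]

-- ===== VERDICT (by name: the statement is the Claim_ definition above) =====
theorem solution_spec : Claim_equal_solution := by
  intro sizes _ hpre
  unfold Spec_solution solution solution_alt
  match sizes with
  | [] => exact absurd rfl hpre
  | p :: rest =>
    simp only [solutionA_fold, List.nil_append, List.map_cons]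
    rw [PySem.List.max?_id_cons, PySem.List.max?_id_cons]
    rw [solutionRec_spec (p :: rest).length _ le_rfl (by simp)]
    simp [mmax]
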